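-- pv_equiv track=rewrite | github.com/eckertantonia/prog3 | py/zaehl.py | sortCounter
-- ===== SOURCE A (Python) =====
-- def sortCounter(counter):
--     sorted_Values = sorted(counter.values(), reverse=True)
--     sorted_Keys = {}
--     for v in sorted_Values:
--         for k in counter.keys():
--             if counter[k] == v:
--                 sorted_Keys[k] = counter[k]
--                 break
--     return sorted_Keys
-- ===== SOURCE B (Python) =====
-- def sortCounter(counter):
--     sorted_items = sorted(counter.items(), key=lambda kv: kv[1], reverse=True)
--     result = {}
--     seen = set()
--     for k, v in sorted_items:
--         if v not in seen:
--             seen.add(v)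
--             result[k] = v
--     return result
-- ===== Notes on version B (the rewrite author's own statement) =====
-- stated objective: alternative
-- what changed: A re-scans all dict keys once per sorted value (including duplicate values); B stably sorts the items by value descending once and makes a single pass inserting each value's first key using a seen-set, so the nested key scan disappears.
import Mathlib
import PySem

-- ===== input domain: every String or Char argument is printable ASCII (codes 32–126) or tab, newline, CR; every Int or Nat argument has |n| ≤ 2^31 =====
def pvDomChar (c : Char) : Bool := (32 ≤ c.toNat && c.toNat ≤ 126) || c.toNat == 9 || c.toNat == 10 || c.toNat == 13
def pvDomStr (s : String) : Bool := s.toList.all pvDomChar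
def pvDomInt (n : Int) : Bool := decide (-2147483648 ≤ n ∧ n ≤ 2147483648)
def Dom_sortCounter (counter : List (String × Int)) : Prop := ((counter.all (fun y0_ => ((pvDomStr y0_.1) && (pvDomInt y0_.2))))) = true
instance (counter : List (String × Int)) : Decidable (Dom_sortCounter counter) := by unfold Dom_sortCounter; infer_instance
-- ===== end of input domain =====

-- B replaces A's per-value rescan of the dict keys by one stable sort of the items followed by a
-- single dedup pass with a seen-set (objective: alternative algorithm; same return value everywhere).

-- ===== PORT A =====
-- inner 'for k in counter.keys(): if counter[k] == v: sorted_Keys[k] = counter[k]; break'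
-- (counter[k] ported as getD k 0: k is drawn from the dict's own keys, so KeyError is impossible)
def pvLoopA (d : PySem.Dict String Int) (v : Int) (acc : PySem.Dict String Int) :
    List String → PySem.Dict String Int
  | [] => acc
  | k :: ks => if d.getD k 0 = v then acc.insert k (d.getD k 0) else pvLoopA d v acc ks

def sortCounter (counter : List (String × Int)) : List (String × Int) :=
  let d := PySem.Dict.ofList counter
  let sortedValues := PySem.List.sorted d.values (fun v => v) true
  (sortedValues.foldl (fun acc v => pvLoopA d v acc d.keys) PySem.Dict.empty).items

-- ===== PORT B =====
def sortCounter_alt (counter : List (String × Int)) : List (String × Int) :=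
  let d := PySem.Dict.ofList counter
  let sortedItems := PySem.List.sorted d.items (fun kv => kv.2) true
  (sortedItems.foldl
    (fun (st : PySem.Dict String Int × PySem.Set Int) kv =>
      if st.2.contains kv.2 then st else (st.1.insert kv.1 kv.2, st.2.add kv.2))
    (PySem.Dict.empty, PySem.Set.ofList [])).1.items

-- ===== PRECONDITION & SPEC =====
def Spec_sortCounter (counter : List (String × Int)) (out : List (String × Int)) : Prop := out = sortCounter_alt counter
instance (counter : List (String × Int)) (out : List (String × Int)) : Decidable (Spec_sortCounter counter out) := by unfold Spec_sortCounter; infer_instance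

-- ===== CLAIM (what is proved, stated in full; the proofs are below) =====
def Claim_equal_sortCounter : Prop := ∀ (counter : List (String × Int)), Dom_sortCounter counter → Spec_sortCounter counter (sortCounter counter)

-- ===== LEMMAS AND PROOFS =====

-- insertBy with the descending comparator, into a descending list, places x directly after the
-- block of elements with key = key x (one stable insertion, seen through a filter at level v)
theorem pv_filter_insertBy {α : Type} (key : α → Int) (v : Int) (x : α) (ys : List α)
    (hys : ys.Pairwise (fun a b => key b ≤ key a)) :
    (PySem.List.insertBy (fun a b => decide (key b < key a)) x ys).filter (fun y => key y == v)
    = ys.filter (fun y => key y == v) ++ (if key x = v then [x] else []) := by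
  induction ys with
  | nil =>
    simp only [PySem.List.insertBy, List.filter_nil, List.nil_append, List.filter_cons]
    split_ifs with h <;> simp_all [beq_iff_eq]
  | cons y ys ih =>
    have hys' := (List.pairwise_cons.mp hys).2
    have hyal := (List.pairwise_cons.mp hys).1
    simp only [PySem.List.insertBy]
    by_cases hb : key y < key x
    · simp only [hb, decide_true, if_true]
      by_cases hxv : key x = v
      · have hnil : (List.filter (fun y => key y == v) (y :: ys)) = [] := by
          rw [List.filter_eq_nil_iff]
          intro a ha
          rw [List.mem_cons] at ha
          rcases ha with rfl | ha
          · simp [beq_iff_eq]; omega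
          · have := hyal a ha; simp [beq_iff_eq]; omega
        rw [List.filter_cons, hnil]
        simp [hxv]
      · rw [List.filter_cons]
        simp [hxv, beq_iff_eq]
    · simp only [hb, decide_false, Bool.false_eq_true, if_false]
      rw [List.filter_cons, List.filter_cons, ih hys']
      by_cases hyv : key y = v <;> simp [hyv]

-- stability of the stable descending sort: equal-key elements keep their original order
theorem pv_filter_sorted_rev {α : Type} (key : α → Int) (v : Int) (xs : List α) :
    (PySem.List.sorted xs key true).filter (fun y => key y == v)
    = xs.filter (fun y => key y == v) := by
  induction xs using List.reverseRecOn with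
  | nil => simp [PySem.List.sorted]
  | append_singleton xs x ih =>
    have h1 : PySem.List.sorted (xs ++ [x]) key true
        = PySem.List.insertBy (fun a b => decide (key b < key a)) x (PySem.List.sorted xs key true) := by
      rw [PySem.List.sorted_rev_eq_foldl_insertBy, PySem.List.sorted_rev_eq_foldl_insertBy, List.foldl_append]
      rfl
    rw [h1, pv_filter_insertBy key v x _ (PySem.List.sorted_pairwise_rev xs key), ih,
      List.filter_append]
    congr 1
    rw [List.filter_cons]
    split_ifs with h h2 h2 <;> simp_all [beq_iff_eq]

-- sorted(values) = map snd of sorted(items, key=snd): both are ≥-sorted rearrangements of the values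
theorem pv_sortedValues_eq (d : PySem.Dict String Int) :
    PySem.List.sorted d.values (fun v => v) true
    = (PySem.List.sorted d.items (fun kv => kv.2) true).map (·.2) := by
  have hperm : (PySem.List.sorted d.values (fun v => v) true).Perm
      ((PySem.List.sorted d.items (fun kv => kv.2) true).map (·.2)) := by
    refine (PySem.List.sorted_perm _ _ _).trans ?_
    have hv : d.values = d.items.map (·.2) := rfl
    rw [hv]
    exact (List.Perm.map _ (PySem.List.sorted_perm _ _ _)).symm
  have h1 : (PySem.List.sorted d.values (fun v => v) true).Pairwise (fun a b : Int => b ≤ a) :=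
    PySem.List.sorted_pairwise_rev _ _
  have h2 : ((PySem.List.sorted d.items (fun kv => kv.2) true).map (·.2)).Pairwise (fun a b : Int => b ≤ a) :=
    List.Pairwise.map _ (fun a b h => h) (PySem.List.sorted_pairwise_rev d.items (fun kv => kv.2))
  have := PySem.List.eq_of_perm_of_pairwise_le_of_injective
      (l₁ := (PySem.List.sorted d.values (fun v => v) true).reverse)
      (l₂ := ((PySem.List.sorted d.items (fun kv => kv.2) true).map (·.2)).reverse)
      (fun x : Int => x) (fun a b h => h)
      (List.reverse_perm _ |>.trans (hperm.trans (List.reverse_perm _).symm))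
      (List.pairwise_reverse.mpr h1) (List.pairwise_reverse.mpr h2)
  exact List.reverse_injective this

theorem pv_loopA_eq_find_aux (d : PySem.Dict String Int) (v : Int)
    (acc : PySem.Dict String Int) (ks : List String) :
    pvLoopA d v acc ks
    = match ks.find? (fun k => d.getD k 0 == v) with
      | some k => acc.insert k (d.getD k 0)
      | none => acc := by
  induction ks with
  | nil => rfl
  | cons k ks ih =>
    rw [pvLoopA, List.find?_cons]
    by_cases h : d.getD k 0 = v
    · simp [h]
    · have hb : (d.getD k 0 == v) = false := by simp [h]
      rw [if_neg h, ih, hb]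

-- A's inner scan over the keys is 'find the first item with value v and insert it'
theorem pv_loopA_eq_find (d : PySem.Dict String Int) (hnd : d.keys.Nodup) (v : Int)
    (acc : PySem.Dict String Int) :
    pvLoopA d v acc d.keys
    = match d.items.find? (fun p => p.2 == v) with
      | some p => acc.insert p.1 p.2
      | none => acc := by
  rw [pv_loopA_eq_find_aux, PySem.Dict.items_eq_map_keys d hnd 0, List.find?_map]
  have he : d.keys.find? ((fun p : String × Int => p.2 == v) ∘ (fun k => (k, d.getD k 0)))
      = d.keys.find? (fun k => d.getD k 0 == v) := rfl
  rw [he]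
  cases h : d.keys.find? (fun k => d.getD k 0 == v) <;> rfl

theorem pv_val_unique (d : PySem.Dict String Int) (hnd : d.keys.Nodup) {k : String} {a b : Int}
    (h1 : (k, a) ∈ d.items) (h2 : (k, b) ∈ d.items) : a = b := by
  have e1 := PySem.Dict.get?_of_mem_items d h1 hnd
  have e2 := PySem.Dict.get?_of_mem_items d h2 hnd
  rw [e1] at e2; exact (Option.some_inj.mp e2)

-- re-inserting a binding a dict already holds leaves the dict unchanged
theorem pv_insert_eq_self (acc : PySem.Dict String Int) (hnd : acc.keys.Nodup) {k : String} {v : Int}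
    (h : acc.get? k = some v) : acc.insert k v = acc := by
  apply PySem.Dict.ext
  rw [PySem.Dict.items_insert_of_contains acc v (by rw [PySem.Dict.contains_eq_isSome_get?, h]; rfl)]
  conv_rhs => rw [← List.map_id acc.items]
  apply List.map_congr_left
  intro p hp
  by_cases hk : p.1 = k
  · have h2 : acc.get? p.1 = some p.2 := PySem.Dict.get?_of_mem_items acc (by exact hp) hnd
    rw [hk, h] at h2
    have h3 : p = (k, v) := by
      obtain ⟨p1, p2⟩ := p
      simp only [Prod.mk.injEq]
      simp only [Option.some_inj] at h2
      exact ⟨hk, h2.symm⟩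
    rw [h3]; simp
  · simp [hk]

-- the paired fold: A's fold over the values of the sorted items = B's fold over the sorted items
theorem pv_fold_pair (d : PySem.Dict String Int) (hnd : d.keys.Nodup)
    (L₂ L₁ : List (String × Int)) (acc : PySem.Dict String Int) (seen : PySem.Set Int)
    (hL : PySem.List.sorted d.items (fun kv => kv.2) true = L₁ ++ L₂)
    (hseen : ∀ v : Int, seen.contains v = true ↔ v ∈ L₁.map (·.2))
    (hacc : ∀ v ∈ L₁.map (·.2), ∃ k0 : String,
        d.items.find? (fun p => p.2 == v) = some (k0, v) ∧ acc.get? k0 = some v)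
    (haccnd : acc.keys.Nodup) :
    L₂.foldl (fun acc kv => pvLoopA d kv.2 acc d.keys) acc
    = (L₂.foldl
        (fun (st : PySem.Dict String Int × PySem.Set Int) kv =>
          if st.2.contains kv.2 then st else (st.1.insert kv.1 kv.2, st.2.add kv.2))
        (acc, seen)).1 := by
  induction L₂ generalizing L₁ acc seen with
  | nil => rfl
  | cons kv rest ih =>
    rw [List.foldl_cons, List.foldl_cons]
    have hkvmem : kv ∈ d.items := by
      rw [← PySem.List.mem_sorted d.items (fun kv => kv.2) true, hL]
      simp
    by_cases hs : seen.contains kv.2 = true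
    · -- value already emitted: A re-inserts the same binding (a no-op), B skips
      obtain ⟨k0, hf, hg⟩ := hacc kv.2 ((hseen kv.2).mp hs)
      have hstep : pvLoopA d kv.2 acc d.keys = acc := by
        rw [pv_loopA_eq_find d hnd, hf]
        exact pv_insert_eq_self acc haccnd hg
      rw [hstep]
      simp only [hs, if_true]
      exact ih (L₁ ++ [kv]) acc seen
        (by rw [hL, List.append_assoc]; rfl)
        (by
          intro v
          rw [hseen v]
          simp only [List.map_append, List.mem_append, List.map_cons, List.map_nil,
            List.mem_cons]
          constructor
          · exact fun h => Or.inl h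
          · rintro (h | h)
            · exact h
            · simp at h; rw [h]; exact (hseen kv.2).mp hs)
        (by
          intro v hv
          simp only [List.map_append, List.mem_append, List.map_cons, List.map_nil] at hv
          rcases hv with hv | hv
          · exact hacc v hv
          · simp at hv; rw [hv]; exact ⟨k0, hf, hg⟩)
        haccnd
    · -- first item with this value: stability makes A's key scan find exactly kv
      have hnotin : kv.2 ∉ L₁.map (·.2) := fun h => hs ((hseen kv.2).mpr h)
      have hfind : d.items.find? (fun p => p.2 == kv.2) = some kv := by
        rw [← List.head?_filter]
        have hfil : d.items.filter (fun p => p.2 == kv.2)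
            = (L₁ ++ kv :: rest).filter (fun p => p.2 == kv.2) := by
          rw [← hL, ← pv_filter_sorted_rev (fun kv : String × Int => kv.2) kv.2 d.items,
            pv_filter_sorted_rev]
        rw [hfil, List.filter_append]
        have h1 : L₁.filter (fun p => p.2 == kv.2) = [] := by
          rw [List.filter_eq_nil_iff]
          intro p hp
          simp only [beq_iff_eq]
          intro hpe
          exact hnotin (by simp only [List.mem_map]; exact ⟨p, hp, by simp [hpe]⟩)
        rw [h1, List.nil_append, List.filter_cons]
        simp
      have hstepA : pvLoopA d kv.2 acc d.keys = acc.insert kv.1 kv.2 := by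
        rw [pv_loopA_eq_find d hnd, hfind]
      rw [hstepA]
      simp only [hs, Bool.false_eq_true, if_false]
      exact ih (L₁ ++ [kv]) (acc.insert kv.1 kv.2) (seen.add kv.2)
        (by rw [hL, List.append_assoc]; rfl)
        (by
          intro v
          rw [PySem.Set.contains_iff, PySem.Set.mem_add]
          simp only [List.map_append, List.mem_append, List.map_cons, List.map_nil,
            List.mem_singleton]
          rw [← hseen v, PySem.Set.contains_iff])
        (by
          intro v hv
          simp only [List.map_append, List.mem_append, List.map_cons, List.map_nil,
            List.mem_singleton] at hv
          rcases hv with hv | hv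
          · obtain ⟨k0, hf, hg⟩ := hacc v hv
            refine ⟨k0, hf, ?_⟩
            rw [PySem.Dict.get?_insert_of_ne]
            · exact hg
            · intro hkk
              have hmem0 : (k0, v) ∈ d.items := List.mem_of_find?_eq_some hf
              rw [hkk] at hmem0
              have hvv : v = kv.2 := pv_val_unique d hnd hmem0
                (by rw [← Prod.mk.eta (p := kv)] at hkvmem; exact hkvmem)
              rw [hvv] at hv
              exact hnotin hv
          · subst hv
            exact ⟨kv.1, by rw [hfind], PySem.Dict.get?_insert_self _ _ _⟩)
        (PySem.Dict.nodup_keys_insert _ _ _ haccnd)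

-- ===== VERDICT (by name: the statement is the Claim_ definition above) =====
theorem sortCounter_spec : Claim_equal_sortCounter := by
  intro counter _
  unfold Spec_sortCounter sortCounter sortCounter_alt
  simp only []
  have hnd := PySem.Dict.nodup_keys_ofList counter
  set d := PySem.Dict.ofList counter with hd
  rw [pv_sortedValues_eq d, List.foldl_map]
  have := pv_fold_pair d hnd (PySem.List.sorted d.items (fun kv => kv.2) true) []
      PySem.Dict.empty (PySem.Set.ofList []) rfl
      (by intro v; simp [PySem.Set.ofList])
      (by intro v hv; simp at hv)
      PySem.Dict.nodup_keys_empty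
  rw [this]
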